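-- pv_equiv track=rewrite | github.com/sfmalloy/everybody-codes | events/2024/quest07/p3.py | check_plan
-- ===== SOURCE A (Python) =====
-- from itertools import cycle, permutations
--
-- def check_plan(plan: list[int], track: list[str]):
--     tot = 0
--     val = 10
--     taken = []
--     for s, t in zip(cycle(plan), track):
--         if t == '-':
--             s = -1
--         elif t == '+':
--             s = 1
--         val += s
--         taken.append(s)
--         tot += val
--     return tot
-- ===== SOURCE B (Python) =====
-- def check_plan(plan: list[int], track: list[str]):
--     # Closed form: each step's delta d_i contributes to every later running
--     # value, so the answer is 10*n plus the weighted sum of deltas d_i*(n-i).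
--     if not plan:
--         return 0
--     n = len(track)
--     total = 10 * n
--     for i, t in enumerate(track):
--         d = -1 if t == '-' else 1 if t == '+' else plan[i % len(plan)]
--         total += d * (n - i)
--     return total
-- ===== Notes on version B (the rewrite author's own statement) =====
-- stated objective: alternative
-- what changed: Replaces A's fused scan that maintains a running value and a running total with a closed-form weighted sum: the result is 10*n plus each step's delta multiplied by the number of later positions it affects, d_i*(n-i), so no running value is kept at all.
import Mathlib
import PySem

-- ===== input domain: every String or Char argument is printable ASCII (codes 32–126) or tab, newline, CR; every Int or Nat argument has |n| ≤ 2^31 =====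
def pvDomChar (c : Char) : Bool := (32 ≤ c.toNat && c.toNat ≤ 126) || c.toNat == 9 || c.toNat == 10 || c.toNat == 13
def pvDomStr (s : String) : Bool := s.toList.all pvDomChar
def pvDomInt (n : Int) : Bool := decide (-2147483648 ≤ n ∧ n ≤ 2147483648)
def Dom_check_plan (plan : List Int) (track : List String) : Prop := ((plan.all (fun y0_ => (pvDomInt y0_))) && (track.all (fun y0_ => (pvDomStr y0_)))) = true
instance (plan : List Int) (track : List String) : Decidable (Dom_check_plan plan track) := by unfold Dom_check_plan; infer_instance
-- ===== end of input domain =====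

-- B replaces A's running-value scan by the closed-form weighted sum 10*n + sum d_i*(n-i); objective: alternative.
-- ===== PORT A =====
-- zip(cycle(plan), track): pairs (plan[i % len plan], track[i]); empty for empty plan (cycle of [] yields nothing).
def cycleZip (plan : List Int) (track : List String) : List (Int × String) :=
  if plan.isEmpty then []
  else track.zipIdx.map (fun p => (plan.getD (p.2 % plan.length) 0, p.1))

def check_plan (plan : List Int) (track : List String) : Int :=
  ((cycleZip plan track).foldl
    (fun (st : Int × Int) (p : Int × String) =>
      let s : Int := if p.2 = "-" then -1 else if p.2 = "+" then 1 else p.1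
      (st.1 + (st.2 + s), st.2 + s))
    (0, 10)).1

-- ===== PORT B =====
def check_plan_alt (plan : List Int) (track : List String) : Int :=
  if plan.isEmpty then 0
  else
    let n : Int := track.length
    track.zipIdx.foldl
      (fun (tot : Int) (q : String × Nat) =>
        let d : Int := if q.1 = "-" then -1 else if q.1 = "+" then 1 else plan.getD (q.2 % plan.length) 0
        tot + d * (n - q.2)) (10 * n)

-- ===== PRECONDITION & SPEC =====
def Spec_check_plan (plan : List Int) (track : List String) (out : Int) : Prop := out = check_plan_alt plan track
instance (plan : List Int) (track : List String) (out : Int) : Decidable (Spec_check_plan plan track out) := by unfold Spec_check_plan; infer_instance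

-- ===== CLAIM (what is proved, stated in full; the proofs are below) =====
def Claim_equal_check_plan : Prop := ∀ (plan : List Int) (track : List String), Dom_check_plan plan track → Spec_check_plan plan track (check_plan plan track)

-- ===== LEMMAS AND PROOFS =====

-- B's fold only shifts its accumulator: it can be pulled out front.
lemma foldB_shift (plan : List Int) (n : Int) (zs : List (String × Nat)) :
    ∀ (c : Int),
    zs.foldl (fun (tot : Int) (q : String × Nat) =>
        let d : Int := if q.1 = "-" then -1 else if q.1 = "+" then 1 else plan.getD (q.2 % plan.length) 0
        tot + d * (n - q.2)) c
    = c + zs.foldl (fun (tot : Int) (q : String × Nat) =>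
        let d : Int := if q.1 = "-" then -1 else if q.1 = "+" then 1 else plan.getD (q.2 % plan.length) 0
        tot + d * (n - q.2)) 0 := by
  induction zs with
  | nil => intro c; simp
  | cons hd tl ih =>
    intro c
    simp only [List.foldl_cons]
    rw [ih, ih (0 + _)]
    ring

-- Key: A's fused scan over the indexed suffix starting at k equals the
-- weighted-sum fold of B over the same suffix, when n = k + length.
lemma key (plan : List Int) (n : Int) :
    ∀ (l : List String) (k : Nat), n = k + l.length →
    ∀ (tot val : Int),
    ((l.zipIdx k).foldl
      (fun (st : Int × Int) (q : String × Nat) =>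
        let s : Int := if q.1 = "-" then -1 else if q.1 = "+" then 1 else plan.getD (q.2 % plan.length) 0
        (st.1 + (st.2 + s), st.2 + s))
      (tot, val)).1
    = tot + l.length * val +
      (l.zipIdx k).foldl (fun (acc : Int) (q : String × Nat) =>
        let d : Int := if q.1 = "-" then -1 else if q.1 = "+" then 1 else plan.getD (q.2 % plan.length) 0
        acc + d * (n - q.2)) 0 := by
  intro l
  induction l with
  | nil => intro k _ tot val; simp
  | cons t l ih =>
    intro k hn tot val
    have hnk : n - (k : Int) = (l.length : Int) + 1 := by
      simp only [List.length_cons] at hn; push_cast at hn ⊢; omega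
    have hn' : n = ((k + 1 : Nat) : Int) + l.length := by push_cast; omega
    simp only [List.zipIdx_cons, List.foldl_cons]
    rw [ih (k + 1) hn']
    rw [foldB_shift plan n (l.zipIdx (k+1))
      (0 + ((if t = "-" then (-1 : Int) else if t = "+" then 1 else plan.getD (k % plan.length) 0) * (n - (k : Int))))]
    rw [hnk]
    simp only [List.length_cons]
    push_cast
    ring

-- ===== VERDICT (by name: the statement is the Claim_ definition above) =====
theorem check_plan_spec : Claim_equal_check_plan := by
  intro plan track _
  show check_plan plan track = check_plan_alt plan track
  unfold check_plan check_plan_alt cycleZip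
  by_cases hp : plan.isEmpty
  · simp [hp]
  · simp only [Bool.not_eq_true] at hp
    simp only [hp, Bool.false_eq_true, if_false]
    rw [List.foldl_map]
    rw [key plan (track.length) track 0 (by simp) 0 10]
    rw [foldB_shift plan (track.length) track.zipIdx (10 * (track.length : Int))]
    ring
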